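-- pv_equiv track=rewrite | github.com/alobo01/Complex-Networks | assignment2/utils.py | generate_pajek_communities
-- ===== SOURCE A (Python) =====
-- def generate_pajek_communities(communities):
--     """Generate lines in Pajek .clu format.
--
--     Parameters
--     ----------
--     communities : list of lists
--         Communities as lists of vertex indices.
--
--     Yields
--     ------
--     str
--         Lines of the .clu file.
--     """
--     communities_list = [list(c) for c in communities]
--     nnodes = sum(len(c) for c in communities_list)
--     yield f"*Vertices {nnodes}"
--
--     for _ in range(nnodes):
--         vertex = min(min(c) for c in communities_list if c)
--         community = next(i for i, c in enumerate(communities_list) if vertex in c)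
--         yield f"{community + 1}"
--         communities_list[community].remove(vertex)
-- ===== SOURCE B (Python) =====
-- def generate_pajek_communities(communities):
--     pairs = [(v, i + 1) for i, c in enumerate(communities) for v in c]
--     yield f"*Vertices {len(pairs)}"
--     for _, idx in sorted(pairs, key=lambda p: p[0]):
--         yield f"{idx}"
-- ===== Notes on version B (the rewrite author's own statement) =====
-- stated objective: faster
-- what changed: A repeatedly rescans all communities for the global minimum vertex and removes it one occurrence at a time (nnodes rounds of full scans with list.remove); B builds the (vertex, community_index+1) pair list in one pass over enumerate(communities) and emits the indices of a single stable sort by vertex.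
import Mathlib
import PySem

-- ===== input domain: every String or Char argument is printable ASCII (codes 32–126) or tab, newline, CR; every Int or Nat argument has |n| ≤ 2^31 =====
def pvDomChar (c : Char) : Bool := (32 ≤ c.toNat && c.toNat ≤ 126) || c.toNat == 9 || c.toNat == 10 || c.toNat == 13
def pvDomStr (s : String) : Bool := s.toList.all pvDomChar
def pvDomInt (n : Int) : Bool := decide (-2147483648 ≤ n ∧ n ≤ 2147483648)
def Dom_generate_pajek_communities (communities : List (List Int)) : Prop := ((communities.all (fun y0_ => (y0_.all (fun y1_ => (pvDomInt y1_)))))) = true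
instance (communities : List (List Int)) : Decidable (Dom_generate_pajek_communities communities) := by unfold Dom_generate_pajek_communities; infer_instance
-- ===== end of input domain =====

-- B replaces A's nnodes rounds of global-min scanning with one stable sort of
-- (vertex, community+1) pairs: simpler, and O(total log total) instead of A's
-- repeated full scans. Both are generators in Python; here: the list of yielded lines.

-- ===== PORT A =====
-- min(min(c) for c in communities_list if c): per-community minima of the nonempty lists
def pvAMins (ls : List (List Int)) : List Int :=
  (ls.filter (fun c => !c.isEmpty)).filterMap (fun c => PySem.List.min? c (fun x => x))

-- the `for _ in range(nnodes)` loop; fuel = nnodes. The `none` branches are where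
-- Python would raise — unreachable, since fuel equals the number of remaining vertices.
def pvALoop : Nat → List (List Int) → List String
  | 0, _ => []
  | n+1, ls =>
    match PySem.List.min? (pvAMins ls) (fun x => x) with
    | none => []
    | some vertex =>
      match ls.findIdx? (fun c => decide (vertex ∈ c)) with
      | none => []
      | some j =>
          -- yield f"{community + 1}"; then communities_list[community].remove(vertex)
          PySem.Int.toStr ((j : Int) + 1) ::
            pvALoop n (ls.set j ((PySem.List.remove? (ls.getD j []) vertex).getD []))

def generate_pajek_communities (communities : List (List Int)) : List String :=
  -- list(c) copies each community; nnodes = sum(len(c) for c in communities_list) ≥ 0, so a Nat sum is exact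
  let nnodes : Nat := (communities.map List.length).sum
  ("*Vertices " ++ PySem.Int.toStr (nnodes : Int)) :: pvALoop nnodes communities

-- ===== PORT B =====
-- pairs = [(v, i + 1) for i, c in enumerate(communities) for v in c]
def pvPairs (communities : List (List Int)) : List (Int × Int) :=
  (PySem.List.enumerate communities).flatMap (fun ic => ic.2.map (fun v => (v, ic.1 + 1)))

def generate_pajek_communities_alt (communities : List (List Int)) : List String :=
  let pairs := pvPairs communities
  ("*Vertices " ++ PySem.Int.toStr (pairs.length : Int)) ::
    (PySem.List.sorted pairs (fun p => p.1)).map (fun p => PySem.Int.toStr p.2)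

-- ===== PRECONDITION & SPEC =====
def Spec_generate_pajek_communities (communities : List (List Int)) (out : List String) : Prop := out = generate_pajek_communities_alt communities
instance (communities : List (List Int)) (out : List String) : Decidable (Spec_generate_pajek_communities communities out) := by unfold Spec_generate_pajek_communities; infer_instance

-- ===== CLAIM (what is proved, stated in full; the proofs are below) =====
def Claim_equal_generate_pajek_communities : Prop := ∀ (communities : List (List Int)), Dom_generate_pajek_communities communities → Spec_generate_pajek_communities communities (generate_pajek_communities communities)

-- ===== LEMMAS AND PROOFS =====

-- total number of vertices = length of the pair list
lemma pv_pairs_length (ls : List (List Int)) : (pvPairs ls).length = (ls.map List.length).sum := by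
  suffices h : ∀ (t : List (List Int)) (s : Int),
      ((PySem.List.enumerate t s).flatMap (fun ic => ic.2.map (fun v => (v, ic.1 + 1)))).length
        = (t.map List.length).sum by
    exact h ls 0
  intro t
  induction t with
  | nil => intro s; simp [PySem.List.enumerate_nil]
  | cons c t ih => intro s; simp [PySem.List.enumerate_cons, ih]

-- an element of the pair list carries a vertex of some community
lemma pv_mem_pairs {ls : List (List Int)} {q : Int × Int} (h : q ∈ pvPairs ls) :
    ∃ c ∈ ls, q.1 ∈ c := by
  unfold pvPairs at h
  rw [List.mem_flatMap] at h
  obtain ⟨ic, hic, hq⟩ := h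
  rw [PySem.List.mem_enumerate_iff] at hic
  obtain ⟨k, hk, rfl⟩ := hic
  rw [List.mem_map] at hq
  obtain ⟨v, hv, rfl⟩ := hq
  exact ⟨ls[k], ls.getElem_mem hk, hv⟩

-- insertBy puts x in front when it sorts before everything
lemma pv_insertBy_front {α : Type} (before : α → α → Bool) (x : α) (ys : List α)
    (h : ∀ y ∈ ys, before x y = true) : PySem.List.insertBy before x ys = x :: ys := by
  cases ys with
  | nil => rfl
  | cons y t => simp [PySem.List.insertBy, h y (by simp)]

-- one more element on the right = one insertion into the sorted prefix
lemma pv_sorted_snoc (ps : List (Int × Int)) (q : Int × Int) :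
    PySem.List.sorted (ps ++ [q]) (fun p => p.1) =
      PySem.List.insertBy (fun a b => decide (a.1 < b.1)) q (PySem.List.sorted ps (fun p => p.1)) := by
  rw [PySem.List.sorted_eq_foldl_insertBy, PySem.List.sorted_eq_foldl_insertBy, List.foldl_append]
  rfl

-- selection step of the stable sort: the first pair of minimal key comes out first
lemma pv_selmin (a : Int × Int) (p2 p1 : List (Int × Int))
    (hne : ∀ q ∈ p1, q.1 ≠ a.1) :
    (∀ q ∈ p1 ++ a :: p2, a.1 ≤ q.1) →
    PySem.List.sorted (p1 ++ a :: p2) (fun p => p.1) =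
      a :: PySem.List.sorted (p1 ++ p2) (fun p => p.1) := by
  induction p2 using List.reverseRecOn with
  | nil =>
    intro hmin
    rw [List.append_nil, pv_sorted_snoc]
    apply pv_insertBy_front
    intro y hy
    rw [PySem.List.mem_sorted] at hy
    have h1 : a.1 ≤ y.1 := hmin y (by simp [hy])
    have h2 : y.1 ≠ a.1 := hne y hy
    simp
    omega
  | append_singleton p2' q ih =>
    intro hmin
    have hmin' : ∀ r ∈ p1 ++ a :: p2', a.1 ≤ r.1 := by
      intro r hr
      apply hmin
      simp at hr ⊢
      tauto
    have hqp : a.1 ≤ q.1 := hmin q (by simp)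
    rw [show p1 ++ a :: (p2' ++ [q]) = (p1 ++ a :: p2') ++ [q] by simp,
        pv_sorted_snoc, ih hmin',
        show p1 ++ (p2' ++ [q]) = (p1 ++ p2') ++ [q] by simp,
        pv_sorted_snoc]
    simp [PySem.List.insertBy, show ¬ (q.1 < a.1) by omega]

lemma pv_set_mid {α : Type} (L1 L2 : List α) (c c' : α) :
    (L1 ++ c :: L2).set L1.length c' = L1 ++ c' :: L2 := by
  induction L1 with
  | nil => rfl
  | cons x t ih => simp [ih]

-- pvPairs of a list split at position j
lemma pv_pairs_split (L1 L2 : List (List Int)) (d : List Int) :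
    pvPairs (L1 ++ d :: L2) =
      pvPairs L1 ++ (d.map (fun v => (v, (0 : Int) + L1.length + 1)) ++
        (PySem.List.enumerate L2 ((0 : Int) + L1.length + 1)).flatMap
          (fun ic => ic.2.map (fun v => (v, ic.1 + 1)))) := by
  unfold pvPairs
  rw [PySem.List.enumerate_append, PySem.List.enumerate_cons, List.flatMap_append, List.flatMap_cons]

-- the main invariant: A's selection loop emits exactly the stably sorted pair list
lemma pv_main : ∀ (n : Nat) (ls : List (List Int)), (ls.map List.length).sum = n →
    pvALoop n ls = (PySem.List.sorted (pvPairs ls) (fun p => p.1)).map (fun p => PySem.Int.toStr p.2) := by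
  intro n
  induction n with
  | zero =>
    intro ls h
    have hp : pvPairs ls = [] := by
      apply List.eq_nil_iff_length_eq_zero.mpr
      rw [pv_pairs_length, h]
    rw [hp]
    rfl
  | succ n ih =>
    intro ls hlen
    -- some community is nonempty
    have hex : ∃ c ∈ ls, c ≠ [] := by
      by_contra hc
      simp only [not_exists, not_and, ne_eq, not_not] at hc
      have hz : (ls.map List.length).sum = 0 := by
        apply List.sum_eq_zero_iff_forall_eq_nat.mpr
        intro x hx
        obtain ⟨c, hcm, rfl⟩ := List.mem_map.mp hx
        rw [hc c hcm]
        rfl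
      omega
    obtain ⟨c0, hc0, hc0ne⟩ := hex
    -- the generator of per-community minima is nonempty, so min() succeeds
    obtain ⟨mc, hmc⟩ : ∃ mc, PySem.List.min? c0 (fun x => x) = some mc := by
      cases h : PySem.List.min? c0 (fun x => x) with
      | none => exact absurd ((PySem.List.min?_eq_none_iff _ _).mp h) hc0ne
      | some w => exact ⟨w, rfl⟩
    have hmcmem : mc ∈ pvAMins ls := by
      unfold pvAMins
      exact List.mem_filterMap.mpr ⟨c0, List.mem_filter.mpr ⟨hc0, by simp [hc0ne]⟩, hmc⟩
    obtain ⟨m, hm⟩ : ∃ m, PySem.List.min? (pvAMins ls) (fun x => x) = some m := by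
      cases h : PySem.List.min? (pvAMins ls) (fun x => x) with
      | none =>
        rw [PySem.List.min?_eq_none_iff] at h
        rw [h] at hmcmem
        exact absurd hmcmem (List.not_mem_nil)
      | some w => exact ⟨w, rfl⟩
    -- m is the global minimum vertex
    have hminAll : ∀ c ∈ ls, ∀ v ∈ c, m ≤ v := by
      intro c hc v hv
      have hcne : c ≠ [] := by rintro rfl; exact absurd hv (List.not_mem_nil)
      obtain ⟨w, hw⟩ : ∃ w, PySem.List.min? c (fun x => x) = some w := by
        cases h : PySem.List.min? c (fun x => x) with
        | none => exact absurd ((PySem.List.min?_eq_none_iff _ _).mp h) hcne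
        | some w => exact ⟨w, rfl⟩
      have h1 : w ≤ v := PySem.List.min?_isMin hw v hv
      have h2 : w ∈ pvAMins ls := by
        unfold pvAMins
        exact List.mem_filterMap.mpr ⟨c, List.mem_filter.mpr ⟨hc, by simp [hcne]⟩, hw⟩
      have h3 : m ≤ w := PySem.List.min?_isMin hm w h2
      omega
    -- m belongs to some community
    have hmmem : ∃ c ∈ ls, m ∈ c := by
      have h1 := PySem.List.min?_mem hm
      unfold pvAMins at h1
      obtain ⟨c, hcf, hcm⟩ := List.mem_filterMap.mp h1
      exact ⟨c, (List.mem_filter.mp hcf).1, PySem.List.min?_mem hcm⟩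
    -- next(...) finds the first community containing m
    obtain ⟨j, hj⟩ : ∃ j, ls.findIdx? (fun c => decide (m ∈ c)) = some j := by
      cases h : ls.findIdx? (fun c => decide (m ∈ c)) with
      | none =>
        rw [List.findIdx?_eq_none_iff] at h
        obtain ⟨c, hc, hmc⟩ := hmmem
        have := h c hc
        simp at this
        exact absurd hmc this
      | some w => exact ⟨w, rfl⟩
    obtain ⟨hjlt, hpj, hjfirst⟩ := List.findIdx?_eq_some_iff_getElem.mp hj
    have hmj : m ∈ ls[j] := by simpa using hpj
    have hnotbefore : ∀ i (hi : i < j), m ∉ ls[i]'(by omega) := by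
      intro i hi
      have := hjfirst i hi
      simpa using this
    -- split ls at j
    set L1 := ls.take j with hL1
    set L2 := ls.drop (j + 1) with hL2
    set c := ls[j] with hc
    have hL1len : L1.length = j := by
      rw [hL1, List.length_take]
      omega
    have hsplit : ls = L1 ++ c :: L2 := by
      rw [hL1, hL2, hc, ← List.drop_eq_getElem_cons hjlt, List.take_append_drop]
    -- split c at the first occurrence of m
    obtain ⟨c1, c2, hmc1, hceq, herase⟩ := List.exists_erase_eq hmj
    -- one step of A's loop
    have hgetD : ls.getD j [] = c := List.getD_eq_getElem ls [] hjlt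
    have hremove : PySem.List.remove? (ls.getD j []) m = some (c1 ++ c2) := by
      rw [hgetD, PySem.List.remove?_eq_some_erase c m hmj, herase]
    have hset : ls.set j (c1 ++ c2) = L1 ++ (c1 ++ c2) :: L2 := by
      conv_lhs => rw [hsplit, ← hL1len]
      exact pv_set_mid L1 L2 c (c1 ++ c2)
    have hstep : pvALoop (n + 1) ls =
        PySem.Int.toStr ((j : Int) + 1) :: pvALoop n (L1 ++ (c1 ++ c2) :: L2) := by
      simp only [pvALoop, hm, hj, hremove, Option.getD_some, hset]
    -- the new total is n
    have hlen' : ((L1 ++ (c1 ++ c2) :: L2).map List.length).sum = n := by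
      rw [hsplit] at hlen
      simp only [List.map_append, List.map_cons, List.sum_append, List.sum_cons] at hlen ⊢
      rw [hceq] at hlen
      simp only [List.length_append, List.length_cons] at hlen ⊢
      omega
    -- pair-list decompositions
    have hP : pvPairs ls =
        (pvPairs L1 ++ c1.map (fun v => (v, (0 : Int) + L1.length + 1))) ++
          (m, (0 : Int) + L1.length + 1) ::
          (c2.map (fun v => (v, (0 : Int) + L1.length + 1)) ++
            (PySem.List.enumerate L2 ((0 : Int) + L1.length + 1)).flatMap
              (fun ic => ic.2.map (fun v => (v, ic.1 + 1)))) := by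
      conv_lhs => rw [hsplit, pv_pairs_split, hceq]
      simp [List.append_assoc]
    have hP' : pvPairs (L1 ++ (c1 ++ c2) :: L2) =
        (pvPairs L1 ++ c1.map (fun v => (v, (0 : Int) + L1.length + 1))) ++
          (c2.map (fun v => (v, (0 : Int) + L1.length + 1)) ++
            (PySem.List.enumerate L2 ((0 : Int) + L1.length + 1)).flatMap
              (fun ic => ic.2.map (fun v => (v, ic.1 + 1)))) := by
      rw [pv_pairs_split]
      simp [List.append_assoc]
    -- no pair before the selected one has key m
    have hne : ∀ q ∈ pvPairs L1 ++ c1.map (fun v => (v, (0 : Int) + L1.length + 1)),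
        q.1 ≠ (m : Int) := by
      intro q hq
      rcases List.mem_append.mp hq with h1 | h1
      · obtain ⟨c', hc', hqc'⟩ := pv_mem_pairs h1
        obtain ⟨i, hi, hgi⟩ := List.getElem_of_mem hc'
        have hi2 : i < j := by rw [hL1len] at hi; exact hi
        have : L1[i] = ls[i]'(by omega) := List.getElem_take
        intro hqm
        apply hnotbefore i hi2
        rw [← this, hgi, ← hqm]
        exact hqc'
      · obtain ⟨v, hv, rfl⟩ := List.mem_map.mp h1
        intro hqm
        apply hmc1
        simpa [← hqm] using hv
    -- every pair's key is at least m
    have hminP : ∀ q ∈ pvPairs ls, (m : Int) ≤ q.1 := by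
      intro q hq
      obtain ⟨c', hc', hqc'⟩ := pv_mem_pairs hq
      exact hminAll c' hc' q.1 hqc'
    -- apply the selection lemma
    have hsorted : PySem.List.sorted (pvPairs ls) (fun p => p.1) =
        ((m : Int), (0 : Int) + L1.length + 1) ::
          PySem.List.sorted (pvPairs (L1 ++ (c1 ++ c2) :: L2)) (fun p => p.1) := by
      rw [hP, pv_selmin _ _ _ hne (by rw [← hP]; exact hminP), ← hP']
    rw [hstep, hsorted, List.map_cons, ih _ hlen']
    simp [hL1len]

-- ===== VERDICT (by name: the statement is the Claim_ definition above) =====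
theorem generate_pajek_communities_spec : Claim_equal_generate_pajek_communities := by
  intro communities _
  show ("*Vertices " ++ PySem.Int.toStr (((communities.map List.length).sum : Nat) : Int)) ::
        pvALoop (communities.map List.length).sum communities
      = ("*Vertices " ++ PySem.Int.toStr (((pvPairs communities).length : Nat) : Int)) ::
        (PySem.List.sorted (pvPairs communities) (fun p => p.1)).map (fun p => PySem.Int.toStr p.2)
  rw [pv_pairs_length, pv_main _ _ rfl]
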